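-- pv_equiv track=rewrite | github.com/krisskrosscode/Python_practice_projects | iNeuron_py_ass/adv_ass_07.py | count_layers
-- ===== SOURCE A (Python) =====
-- def count_layers(s):
--     layers = 0
--     if len(s)%2==0:
--         n = len(s)//2 - 1
--     else:
--         n = len(s)//2
--
--     if len(s[n])%2==0:
--         nn = len(s[n])//2 - 1
--     else:
--         nn = len(s[n])//2
--
--     for i in range(1, nn+1):
--         if s[n][i] != s[n][i-1]:
--             layers += 1
--
--     return layers+1
-- ===== SOURCE B (Python) =====
-- def _runs(cs):
--     # divide-and-conquer run count: runs(left)+runs(right), merged runs at the cut fuse into one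
--     if len(cs) <= 1:
--         return len(cs)
--     m = len(cs) // 2
--     return _runs(cs[:m]) + _runs(cs[m:]) - (cs[m - 1] == cs[m])
--
-- def count_layers(s):
--     n = (len(s) - 1) // 2
--     row = s[n]
--     half = row[:(len(row) - 1) // 2 + 1]
--     return max(1, _runs(half))
-- ===== Notes on version B (the rewrite author's own statement) =====
-- stated objective: alternative
-- what changed: Replaces A's parity branching with the closed-form middle index (len-1)//2 and replaces A's sequential adjacent-pair scan with a divide-and-conquer run counter: runs(half) = runs(left)+runs(right) minus one when the runs at the cut fuse.
import Mathlib
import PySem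

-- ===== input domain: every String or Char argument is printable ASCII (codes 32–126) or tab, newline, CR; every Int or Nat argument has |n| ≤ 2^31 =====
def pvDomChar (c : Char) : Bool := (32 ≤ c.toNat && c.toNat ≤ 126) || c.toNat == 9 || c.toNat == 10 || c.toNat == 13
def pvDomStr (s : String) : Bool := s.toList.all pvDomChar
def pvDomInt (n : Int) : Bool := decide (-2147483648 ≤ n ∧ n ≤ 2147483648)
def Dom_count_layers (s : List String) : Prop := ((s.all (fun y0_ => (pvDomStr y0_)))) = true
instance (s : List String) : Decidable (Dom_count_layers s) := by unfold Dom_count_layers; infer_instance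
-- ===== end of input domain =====

-- B replaces A's parity branching with the closed-form middle index (len-1)//2 and replaces A's
-- sequential adjacent-pair scan with a divide-and-conquer run counter (runs(left)+runs(right),
-- minus one when the runs at the cut fuse) — an alternative algorithm, same asymptotic cost.

-- ===== PORT A =====
-- Literal port of A. `pyGet? s n = none` is A's IndexError on an empty grid (excluded by Pre_);
-- the in-loop indices 1..nn are always in range in Python, so comparing the Option values is exact.
def count_layers (s : List String) : Int :=
  let L : Int := PySem.List.len s
  let n : Int := if PySem.Int.mod L 2 = 0 then PySem.Int.floordiv L 2 - 1 else PySem.Int.floordiv L 2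
  match PySem.List.pyGet? s n with
  | none => 0
  | some row =>
    let rl : Int := PySem.Str.len row
    let nn : Int := if PySem.Int.mod rl 2 = 0 then PySem.Int.floordiv rl 2 - 1 else PySem.Int.floordiv rl 2
    let layers : Int := (PySem.List.pyRange 1 (nn + 1) 1).foldl
      (fun acc i => if PySem.Str.pyGet? row i ≠ PySem.Str.pyGet? row (i - 1) then acc + 1 else acc) 0
    layers + 1

-- ===== PORT B =====
-- _runs: divide-and-conquer run counting (Source B's recursion, step for step; bool-int subtraction
-- becomes an if 1/0).
-- (fuel = cs.length bounds the recursion depth structurally; it is only a totality guard,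
-- never reached, since each half is strictly shorter)
def runsRecAux : Nat → List Char → Int
  | 0, cs => (cs.length : Int)
  | fuel + 1, cs =>
    if cs.length ≤ 1 then (cs.length : Int)
    else
      let m : Nat := cs.length / 2
      runsRecAux fuel (PySem.List.slice cs none (some (m : Int))) +
        runsRecAux fuel (PySem.List.slice cs (some (m : Int)) none) -
        (if PySem.List.pyGet? cs ((m : Int) - 1) = PySem.List.pyGet? cs (m : Int) then 1 else 0)

def runsRec (cs : List Char) : Int := runsRecAux cs.length cs

def count_layers_alt (s : List String) : Int :=
  let n : Int := PySem.Int.floordiv (PySem.List.len s - 1) 2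
  match PySem.List.pyGet? s n with
  | none => 0
  | some row =>
    let half := PySem.Chars.slice row.toList none
      (some (PySem.Int.floordiv (PySem.Str.len row - 1) 2 + 1))
    max 1 (runsRec half)

-- ===== PRECONDITION & SPEC =====
-- Pre_ excludes only the empty grid, on which A raises IndexError (s[n] with s = []).
def Pre_count_layers (s : List String) : Prop := s ≠ []
instance (s : List String) : Decidable (Pre_count_layers s) := by unfold Pre_count_layers; infer_instance
def pvWitness_count_layers : List String := ["ab", "aabba", "xy"]

def Spec_count_layers (s : List String) (out : Int) : Prop := out = count_layers_alt s
instance (s : List String) (out : Int) : Decidable (Spec_count_layers s out) := by unfold Spec_count_layers; infer_instance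

-- ===== CLAIM (what is proved, stated in full; the proofs are below) =====
def Claim_equal_count_layers : Prop := ∀ (s : List String), Dom_count_layers s → Pre_count_layers s → Spec_count_layers s (count_layers s)

-- ===== LEMMAS AND PROOFS =====

-- Number of adjacent unequal pairs: the common yardstick both run counters are measured against.
def transCount : List Char → Int
  | [] => 0
  | [_] => 0
  | a :: b :: t => (if a ≠ b then 1 else 0) + transCount (b :: t)

lemma transCount_nonneg (cs : List Char) : 0 ≤ transCount cs := by
  induction cs with
  | nil => simp [transCount]
  | cons a t ih =>
    cases t with
    | nil => simp [transCount]
    | cons b t' =>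
      simp only [transCount]
      split_ifs <;> omega

-- Splitting: transitions of a concatenation are the two halves' transitions plus the cut pair.
lemma transCount_append (xs ys : List Char) (hx : xs ≠ []) (hy : ys ≠ []) :
    transCount (xs ++ ys)
      = transCount xs + transCount ys + (if xs.getLast hx = ys.head hy then 0 else 1) := by
  induction xs with
  | nil => contradiction
  | cons a xs ih =>
    cases xs with
    | nil =>
      cases ys with
      | nil => contradiction
      | cons b t =>
        simp only [List.cons_append, List.nil_append, transCount, List.getLast_singleton,
          List.head_cons]
        generalize transCount (b :: t) = T
        split_ifs <;> first | omega | simp_all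
    | cons a' xs' =>
      have h' : a' :: xs' ≠ [] := by simp
      simp only [List.cons_append, transCount] at ih ⊢
      rw [ih h', List.getLast_cons h']
      generalize transCount (a' :: xs') = T1
      generalize transCount ys = T2
      split_ifs <;> omega

-- The divide-and-conquer counter computes transitions + 1 on nonempty input.
lemma runsRecAux_eq (fuel : Nat) : ∀ (cs : List Char), cs.length ≤ fuel →
    runsRecAux fuel cs = if cs = [] then 0 else transCount cs + 1 := by
  induction fuel with
  | zero =>
    intro cs hle
    have : cs = [] := List.length_eq_zero_iff.mp (by omega)
    subst this
    simp [runsRecAux]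
  | succ fuel ih =>
    intro cs hle
    rw [runsRecAux]
    by_cases h1 : cs.length ≤ 1
    · cases cs with
      | nil => simp
      | cons a t =>
        cases t with
        | nil => simp [transCount]
        | cons b t' => simp at h1
    · have h2 : 2 ≤ cs.length := by omega
      simp only [h1]
      set m : Nat := cs.length / 2 with hm
      have hm1 : 1 ≤ m := by omega
      have hmlt : m < cs.length := by omega
      rw [PySem.List.slice_to_natCast, PySem.List.slice_from_natCast]
      have htake : (cs.take m).length = m := by simp; omega
      have hdrop : (cs.drop m).length = cs.length - m := by simp
      have htne : cs.take m ≠ [] := by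
        intro h; rw [h] at htake; simp at htake; omega
      have hdne : cs.drop m ≠ [] := by
        intro h; rw [h] at hdrop; simp at hdrop; omega
      rw [ih _ (by omega), ih _ (by omega)]
      simp only [htne, hdne, if_false]
      have hg1 : PySem.List.pyGet? cs ((m : Int) - 1) = some cs[m - 1] := by
        rw [show ((m : Int) - 1) = ((m - 1 : Nat) : Int) by omega]
        exact PySem.List.pyGet?_eq_some_getElem cs (by omega) (by exact_mod_cast (by omega : m - 1 < cs.length))
      have hg2 : PySem.List.pyGet? cs (m : Int) = some cs[m] := by
        exact PySem.List.pyGet?_eq_some_getElem cs (by omega) (by exact_mod_cast hmlt)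
      have hlast : (cs.take m).getLast htne = cs[m - 1] := by
        rw [List.getLast_eq_getElem]
        simp only [htake]
        rw [List.getElem_take]
      have hcsne : cs ≠ [] := by intro h; rw [h] at h2; simp at h2
      have hhead : (cs.drop m).head hdne = cs[m] := by
        rw [List.head_eq_getElem]
        simp
      have hsplit := transCount_append (cs.take m) (cs.drop m) htne hdne
      rw [List.take_append_drop] at hsplit
      rw [hsplit, hlast, hhead, hg1, hg2]
      simp only [Option.some.injEq, hcsne, if_false]
      generalize transCount (List.take m cs) = T1
      generalize transCount (List.drop m cs) = T2
      split_ifs <;> omega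

lemma runsRec_eq (cs : List Char) :
    runsRec cs = if cs = [] then 0 else transCount cs + 1 :=
  runsRecAux_eq cs.length cs le_rfl

-- A's parity split of the middle index equals B's closed form (len-1)//2.
lemma mid_idx (L : Int) :
    (if PySem.Int.mod L 2 = 0 then PySem.Int.floordiv L 2 - 1 else PySem.Int.floordiv L 2)
      = PySem.Int.floordiv (L - 1) 2 := by
  rw [PySem.Int.mod_eq_emod_of_pos (a := L) (by omega),
      PySem.Int.floordiv_eq_ediv_of_pos (a := L) (by omega),
      PySem.Int.floordiv_eq_ediv_of_pos (a := L - 1) (by omega)]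
  split_ifs <;> omega

-- A's index loop over 1..k counts the transitions of the prefix cs[0..k].
lemma loop_eq (cs : List Char) (k : Nat) (hk : k < cs.length) :
    (PySem.List.pyRange 1 ((k : Int) + 1) 1).foldl
        (fun acc i => if PySem.List.pyGet? cs i ≠ PySem.List.pyGet? cs (i - 1) then acc + 1 else acc) 0
      = transCount (cs.take (k + 1)) := by
  induction k with
  | zero =>
    rw [PySem.List.pyRange_one_eq_nil (by omega)]
    cases cs with
    | nil => simp at hk
    | cons c t => simp [transCount]
  | succ k ih =>
    have hk' : k < cs.length := by omega
    have htake : cs.take (k + 1 + 1) = cs.take (k + 1) ++ [cs[k + 1]] := by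
      rw [List.take_add_one]
      simp [List.getElem?_eq_getElem hk]
    have htne : cs.take (k + 1) ≠ [] := by
      cases cs with
      | nil => simp at hk
      | cons c t => simp
    have hrange : PySem.List.pyRange 1 (((k : Nat) + 1 : Int) + 1) 1
        = PySem.List.pyRange 1 ((k : Int) + 1) 1 ++ [((k : Int) + 1)] := by
      exact_mod_cast PySem.List.pyRange_one_succ_right (a := 1) (b := (k : Int) + 1) (by omega)
    have h1 : PySem.List.pyGet? cs ((k : Int) + 1) = some cs[k + 1] := by
      rw [show ((k : Int) + 1) = ((k + 1 : Nat) : Int) by push_cast; ring]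
      exact PySem.List.pyGet?_eq_some_getElem cs (by omega) (by exact_mod_cast hk)
    have h2 : PySem.List.pyGet? cs ((k : Int) + 1 - 1) = some cs[k] := by
      rw [show ((k : Int) + 1 - 1) = ((k : Nat) : Int) by ring]
      exact PySem.List.pyGet?_eq_some_getElem cs (by omega) (by exact_mod_cast hk')
    have hlast : (cs.take (k + 1)).getLast htne = cs[k] := by
      rw [List.getLast_eq_getElem]
      have : (cs.take (k + 1)).length = k + 1 := by simp; omega
      simp only [this]
      rw [List.getElem_take]
      simp
    have hsplit := transCount_append (cs.take (k + 1)) [cs[k + 1]] htne (by simp)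
    rw [List.head_cons, hlast] at hsplit
    push_cast at hrange ⊢
    rw [htake, hrange, List.foldl_append, ih hk', hsplit]
    simp only [List.foldl_cons, List.foldl_nil, transCount, h1, h2, Option.some.injEq, ne_eq]
    generalize transCount (List.take (k + 1) cs) = T
    rcases eq_or_ne cs[k] cs[k + 1] with he | he
    · simp [he]
    · simp [he, Ne.symm he]

-- Per-row equality: A's indexed half-row loop (+1) equals B's recursive run count of the half row.
lemma row_eq (cs : List Char) :
    (PySem.List.pyRange 1
        ((if PySem.Int.mod ((cs.length : Int)) 2 = 0 then PySem.Int.floordiv ((cs.length : Int)) 2 - 1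
          else PySem.Int.floordiv ((cs.length : Int)) 2) + 1) 1).foldl
      (fun acc i => if PySem.List.pyGet? cs i ≠ PySem.List.pyGet? cs (i - 1) then acc + 1 else acc) 0 + 1
      = max 1 (runsRec (PySem.List.slice cs none (some (PySem.Int.floordiv ((cs.length : Int) - 1) 2 + 1)))) := by
  rw [mid_idx ((cs.length : Int))]
  set nn : Int := PySem.Int.floordiv ((cs.length : Int) - 1) 2 with hnn
  rcases Nat.eq_zero_or_pos cs.length with hm | hm
  · -- empty row: both sides are 1
    have h0 : nn + 1 = ((0 : Nat) : Int) := by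
      rw [hnn, PySem.Int.floordiv_eq_ediv_of_pos (by omega)]
      omega
    rw [h0, PySem.List.slice_to_natCast cs 0, PySem.List.pyRange_one_eq_nil (by omega)]
    simp [runsRec, runsRecAux]
  · have hnnk : nn = (((cs.length - 1) / 2 : Nat) : Int) := by
      rw [hnn, PySem.Int.floordiv_eq_ediv_of_pos (by omega)]
      omega
    set k : Nat := (cs.length - 1) / 2 with hk
    have hklt : k < cs.length := by omega
    have h1 : nn + 1 = ((k + 1 : Nat) : Int) := by rw [hnnk]; push_cast; ring
    rw [h1, PySem.List.slice_to_natCast cs (k + 1)]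
    have htne : cs.take (k + 1) ≠ [] := by
      cases cs with
      | nil => simp at hm
      | cons c t => simp
    rw [runsRec_eq, if_neg htne]
    have hnonneg := transCount_nonneg (cs.take (k + 1))
    push_cast
    rw [loop_eq cs k hklt]
    generalize hT : transCount (List.take (k + 1) cs) = T at hnonneg ⊢
    omega

-- ===== VERDICT (by name: the statement is the Claim_ definition above) =====
theorem count_layers_spec : Claim_equal_count_layers := by
  intro s _ hpre
  unfold Spec_count_layers count_layers count_layers_alt
  simp only [PySem.List.len_eq, PySem.Str.len_eq, PySem.Str.pyGet?_eq,
    PySem.Chars.pyGet?_eq_listPyGet?, PySem.Chars.slice_eq_listSlice]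
  rw [mid_idx (s.length : Int)]
  have hlen : 1 ≤ s.length := List.length_pos_iff.mpr hpre
  set n : Int := PySem.Int.floordiv ((s.length : Int) - 1) 2 with hn
  have hnb : 0 ≤ n ∧ n < (s.length : Int) := by
    rw [hn, PySem.Int.floordiv_eq_ediv_of_pos (by omega)]
    omega
  obtain ⟨row, hrow⟩ : ∃ row, PySem.List.pyGet? s n = some row :=
    ⟨_, PySem.List.pyGet?_eq_some_getElem s hnb.1 hnb.2⟩
  rw [hrow]
  exact row_eq row.toList
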